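-- pv_equiv track=rewrite | github.com/ximinng/HiVG | hivg_tokenizer/tokenizer.py | tokens_to_string
-- ===== SOURCE A (Python) =====
-- from typing import List, Tuple
--
-- def _is_attr_token(token: str) -> bool:
--     """Check if token is an attribute (key=value format)."""
--     return '=' in token and not token.startswith('<')
--
-- def _is_bare_number(token: str) -> bool:
--     """Check if token is a bare number (not wrapped in <> or containing =)."""
--     if not token or token.startswith('<') or '=' in token:
--         return False
--     # Check if it looks like a number: optional sign, digits, optional decimal
--     # Supports: 123, -45, 0.5, -.5, .5, -0.5
--     s = token.strip()
--     if not s: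
--         return False
--     i = 0
--     if s[i] in '+-':
--         i += 1
--     if i >= len(s):
--         return False
--     has_digit = False
--     # Integer part
--     while i < len(s) and s[i].isdigit():
--         has_digit = True
--         i += 1
--     # Decimal part
--     if i < len(s) and s[i] == '.':
--         i += 1
--         while i < len(s) and s[i].isdigit():
--             has_digit = True
--             i += 1
--     return has_digit and i == len(s)
--
-- def tokens_to_string(tokens: List[str], use_space: bool = False) -> str:
--     """
--     Convert token list to string.
--
--     Args:
--         tokens: List of SVG tokens
--         use_space: If True, use full space separator (legacy format).
--                    If False (default), use smart spacing (saves ~19% Qwen tokens).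
--                    Smart spacing only adds space between consecutive attributes
--                    to avoid ambiguity (e.g., 'fill=#fffstroke=...' is ambiguous).
--
--     Returns:
--         Token string
--
--     Example:
--         # Full space: '<svg> viewBox=0 0 1008 1008 <path> fill=#fff <cmd_M> <P_100>'
--         # Smart space: '<svg>viewBox=0 0 1008 1008<path>fill=#fff opacity=0.5<cmd_M><P_100>'
--         # Note: space kept between consecutive attrs (fill=#fff opacity=0.5)
--     """
--     if use_space:
--         return ' '.join(tokens)
--
--     # Smart join: add space between tokens that would be ambiguous without it
--     if not tokens:
--         return ''
--
--     result = [tokens[0]]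
--     for i in range(1, len(tokens)):
--         prev, curr = tokens[i - 1], tokens[i]
--         # Add space if:
--         # 1. Both are attributes (e.g., fill=#fff stroke=#000)
--         # 2. Both are bare numbers (e.g., 50 30 45 for arc rx ry rotation)
--         # 3. Bare number followed by attribute or vice versa
--         prev_is_attr = _is_attr_token(prev)
--         prev_is_num = _is_bare_number(prev)
--         curr_is_attr = _is_attr_token(curr)
--         curr_is_num = _is_bare_number(curr)
--
--         need_space = (
--             (prev_is_attr and curr_is_attr) or
--             (prev_is_num and curr_is_num) or
--             (prev_is_num and curr_is_attr) or
--             (prev_is_attr and curr_is_num)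
--         )
--         if need_space:
--             result.append(' ')
--         result.append(curr)
--
--     return ''.join(result)
-- ===== SOURCE B (Python) =====
-- from typing import List
--
--
-- def _is_value_token(token: str) -> bool:
--     """True for attribute tokens (contain '=') and bare numbers; '<...>' tokens never count."""
--     if token.startswith('<'):
--         return False
--     if '=' in token:
--         return True
--     s = token.strip()
--     if s and s[0] in '+-':
--         s = s[1:]
--     # bare number = digits with at most one '.' somewhere, at least one digit
--     return (s.count('.') <= 1
--             and any(c.isdigit() for c in s)
--             and all(c.isdigit() or c == '.' for c in s))
--
--
-- def tokens_to_string(tokens: List[str], use_space: bool = False) -> str: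
--     if use_space:
--         return ' '.join(tokens)
--     # Run-length grouping: cut the list into maximal runs of equally-classified
--     # tokens; a run of value tokens is space-joined, any other run is glued.
--     out = []
--     i, n = 0, len(tokens)
--     while i < n:
--         f = _is_value_token(tokens[i])
--         j = i + 1
--         while j < n and _is_value_token(tokens[j]) == f:
--             j += 1
--         run = tokens[i:j]
--         out.append(' '.join(run) if f else ''.join(run))
--         i = j
--     return ''.join(out)
-- ===== Notes on version B (the rewrite author's own statement) =====
-- stated objective: alternative
-- what changed: Replaces A's pairwise neighbour-comparison loop (classifying prev and curr at every step and inserting a space per adjacent pair) by a run-length-grouping algorithm: the list is first cut into maximal runs of equally-classified tokens (one merged attribute-or-bare-number predicate, written as count/any/all over the characters instead of A's index scanner), then each value run is ' '.join-ed and every other run glued, and the run strings are concatenated; no adjacent pair is ever compared.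
import Mathlib
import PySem

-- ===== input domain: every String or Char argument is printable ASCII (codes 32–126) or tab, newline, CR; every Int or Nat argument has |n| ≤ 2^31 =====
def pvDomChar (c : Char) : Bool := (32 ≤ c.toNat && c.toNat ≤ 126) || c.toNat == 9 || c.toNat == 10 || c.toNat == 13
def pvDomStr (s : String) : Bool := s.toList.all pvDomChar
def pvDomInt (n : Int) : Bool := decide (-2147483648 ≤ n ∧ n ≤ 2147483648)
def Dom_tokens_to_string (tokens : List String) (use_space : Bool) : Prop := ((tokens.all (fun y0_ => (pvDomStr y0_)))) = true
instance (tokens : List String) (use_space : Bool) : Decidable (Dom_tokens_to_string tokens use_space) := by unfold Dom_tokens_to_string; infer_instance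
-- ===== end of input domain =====

-- B replaces A's pairwise neighbour-comparison loop by run-length grouping: cut the list into
-- maximal runs of equally-classified tokens (one merged value-token predicate written as
-- count/any/all instead of A's index scanner), space-join value runs, glue the rest, and
-- concatenate the run strings; same asymptotic cost (objective: alternative algorithm).

-- ===== PORT A =====
def aIsAttrToken (token : String) : Bool :=
  PySem.Str.isIn "=" token && !(PySem.Str.startswith token "<")

-- the two 'while … isdigit' loops of _is_bare_number: consume leading digits,
-- threading the has_digit flag; returns (has_digit, remaining characters)
def aEatDigits : List Char → Bool → Bool × List Char
  | c :: rest, h => if PySem.Chars.isdigit c then aEatDigits rest true else (h, c :: rest)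
  | [], h => (h, [])

def aIsBareNumber (token : String) : Bool :=
  if token == "" || PySem.Str.startswith token "<" || PySem.Str.isIn "=" token then false
  else
    let s := (PySem.Str.strip token).toList
    if s.isEmpty then false
    else
      -- optional sign
      let s1 := match s with
        | c :: rest => if c == '+' || c == '-' then rest else c :: rest
        | [] => []
      if s1.isEmpty then false   -- 'if i >= len(s): return False'
      else
        let r1 := aEatDigits s1 false          -- integer part
        let r2 := match r1.2 with              -- optional '.', then decimal part
          | '.' :: rest => aEatDigits rest r1.1
          | other => (r1.1, other)
        r2.1 && r2.2.isEmpty                   -- has_digit and i == len(s)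

def tokens_to_string (tokens : List String) (use_space : Bool) : String :=
  if use_space then PySem.Str.join " " tokens
  else match tokens with
  | [] => ""
  | t0 :: _ =>
    let result :=
      (PySem.List.pyRange 1 (tokens.length : Int) 1).foldl (fun acc i =>
        let prev := PySem.List.pyGetD tokens (i - 1) ""
        let curr := PySem.List.pyGetD tokens i ""
        let prev_is_attr := aIsAttrToken prev
        let prev_is_num := aIsBareNumber prev
        let curr_is_attr := aIsAttrToken curr
        let curr_is_num := aIsBareNumber curr
        let need_space := (prev_is_attr && curr_is_attr) || (prev_is_num && curr_is_num) ||
                          (prev_is_num && curr_is_attr) || (prev_is_attr && curr_is_num)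
        (if need_space then acc ++ [" "] else acc) ++ [curr]) [t0]
    PySem.Str.join "" result

-- ===== PORT B =====
def altIsValueToken (token : String) : Bool :=
  if PySem.Str.startswith token "<" then false
  else if PySem.Str.isIn "=" token then true
  else
    let s0 := (PySem.Str.strip token).toList
    let s := match s0 with
      | c :: rest => if c == '+' || c == '-' then rest else c :: rest
      | [] => []
    decide (s.count '.' ≤ 1) && s.any PySem.Chars.isdigit &&
      s.all (fun c => PySem.Chars.isdigit c || c == '.')

-- the outer while loop of B: peel off one maximal run of equally-classified tokens
-- (the inner 'while … == f' loop is the takeWhile/dropWhile split) and recurse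
def altGroups : List String → List (Bool × List String)
  | [] => []
  | t :: rest =>
    let f := altIsValueToken t
    let run := rest.takeWhile (fun x => altIsValueToken x == f)
    let rest' := rest.dropWhile (fun x => altIsValueToken x == f)
    (f, t :: run) :: altGroups rest'
termination_by l => l.length
decreasing_by
  simp only [List.length_cons]
  exact Nat.lt_succ_of_le (List.length_dropWhile_le _ _)

def tokens_to_string_alt (tokens : List String) (use_space : Bool) : String :=
  if use_space then PySem.Str.join " " tokens
  else PySem.Str.join ""
    ((altGroups tokens).map (fun g =>
      if g.1 then PySem.Str.join " " g.2 else PySem.Str.join "" g.2))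

-- ===== PRECONDITION & SPEC =====
def Spec_tokens_to_string (tokens : List String) (use_space : Bool) (out : String) : Prop := out = tokens_to_string_alt tokens use_space
instance (tokens : List String) (use_space : Bool) (out : String) : Decidable (Spec_tokens_to_string tokens use_space out) := by unfold Spec_tokens_to_string; infer_instance

-- ===== CLAIM (what is proved, stated in full; the proofs are below) =====
def Claim_equal_tokens_to_string : Prop := ∀ (tokens : List String) (use_space : Bool), Dom_tokens_to_string tokens use_space → Spec_tokens_to_string tokens use_space (tokens_to_string tokens use_space)

-- ===== LEMMAS AND PROOFS =====

-- A's per-step loop body, named for the proofs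
def aStep (acc : List String) (p c : String) : List String :=
  (if ((aIsAttrToken p && aIsAttrToken c) || (aIsBareNumber p && aIsBareNumber c) ||
       (aIsBareNumber p && aIsAttrToken c) || (aIsAttrToken p && aIsBareNumber c))
   then acc ++ [" "] else acc) ++ [c]

-- fold over adjacent pairs: the shape A's index loop reduces to
def pairFoldAux {α β : Type} (g : β → α → α → β) : β → List α → β
  | acc, p :: c :: t => pairFoldAux g (g acc p c) (c :: t)
  | acc, [] => acc
  | acc, [_] => acc

theorem pairFoldAux_short {α β : Type} (g : β → α → α → β) (acc : β) (l : List α)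
    (h : l.length ≤ 1) : pairFoldAux g acc l = acc := by
  match l, h with
  | [], _ => rfl
  | [_], _ => rfl

theorem eat_spec (cs : List Char) (h : Bool) :
    aEatDigits cs h = (h || !(cs.takeWhile PySem.Chars.isdigit).isEmpty, cs.dropWhile PySem.Chars.isdigit) := by
  induction cs generalizing h with
  | nil => simp [aEatDigits]
  | cons c rest ih =>
    by_cases hc : PySem.Chars.isdigit c = true
    · simp [aEatDigits, hc, ih]
    · simp [aEatDigits, hc]

theorem head_dropWhile_false {α} (l t : List α) (p : α → Bool) (c : α)
    (h : l.dropWhile p = c :: t) : p c = false := by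
  have h1 : l.dropWhile p ≠ [] := by simp [h]
  have := List.head_dropWhile_not (p := p) (l := l) h1
  rw [show (l.dropWhile p).head h1 = c from by simp [h]] at this
  simpa using this

theorem any_of_all_digit (l : List Char) (hall : ∀ x ∈ l, PySem.Chars.isdigit x = true) :
    l.any PySem.Chars.isdigit = !l.isEmpty := by
  cases l with
  | nil => simp
  | cons c t => simp [List.any_cons, hall c (by simp)]

theorem count_dot_zero (l : List Char) (hall : ∀ x ∈ l, PySem.Chars.isdigit x = true) :
    l.count '.' = 0 := by
  rw [List.count_eq_zero]
  intro hm
  have := hall _ hm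
  simp [PySem.Chars.isdigit] at this

theorem all_digit_dot (l : List Char) (hall : ∀ x ∈ l, PySem.Chars.isdigit x = true) :
    l.all (fun c => PySem.Chars.isdigit c || c == '.') = true := by
  rw [List.all_eq_true]; intro c hc; simp [hall c hc]

-- A's two-phase digit scanner equals B's count/any/all formulation
theorem scan_eq (cs : List Char) :
    ((let r1 := aEatDigits cs false
      let r2 := match r1.2 with
        | '.' :: rest => aEatDigits rest r1.1
        | other => (r1.1, other)
      r2.1 && r2.2.isEmpty) : Bool)
    = (decide (cs.count '.' ≤ 1) && cs.any PySem.Chars.isdigit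
        && cs.all (fun c => PySem.Chars.isdigit c || c == '.')) := by
  have hsplit : cs.takeWhile PySem.Chars.isdigit ++ cs.dropWhile PySem.Chars.isdigit = cs :=
    List.takeWhile_append_dropWhile
  have htw : ∀ x ∈ cs.takeWhile PySem.Chars.isdigit, PySem.Chars.isdigit x = true :=
    fun x hx => List.mem_takeWhile_imp hx
  simp only [eat_spec]
  cases hd : cs.dropWhile PySem.Chars.isdigit with
  | nil =>
    have htweq : cs.takeWhile PySem.Chars.isdigit = cs := by
      rw [hd] at hsplit; simpa using hsplit
    have hall : ∀ x ∈ cs, PySem.Chars.isdigit x = true := htweq ▸ htw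
    simp [htweq, count_dot_zero cs hall, any_of_all_digit cs hall, all_digit_dot cs hall]
  | cons c rest =>
    have hcnd : PySem.Chars.isdigit c = false := head_dropWhile_false cs rest _ c hd
    have hcmem : c ∈ cs := (List.dropWhile_sublist _).mem (by rw [hd]; simp)
    by_cases hcdot : c = '.'
    · subst hcdot
      simp only [hd]
      have hcs : cs = cs.takeWhile PySem.Chars.isdigit ++ '.' :: rest := by
        conv_lhs => rw [← hsplit, hd]
      have hcnt : cs.count '.' = 1 + rest.count '.' := by
        conv_lhs => rw [hcs]
        simp [List.count_append, count_dot_zero _ htw]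
        omega
      have hany : cs.any PySem.Chars.isdigit
          = (!(cs.takeWhile PySem.Chars.isdigit).isEmpty || rest.any PySem.Chars.isdigit) := by
        conv_lhs => rw [hcs]
        simp [List.any_append, any_of_all_digit _ htw, hcnd]
      have hallc : cs.all (fun c => PySem.Chars.isdigit c || c == '.')
          = rest.all (fun c => PySem.Chars.isdigit c || c == '.') := by
        conv_lhs => rw [hcs]
        simp [List.all_append, all_digit_dot _ htw]
      rw [hany, hallc]
      have htw2 : ∀ x ∈ rest.takeWhile PySem.Chars.isdigit, PySem.Chars.isdigit x = true :=
        fun x hx => List.mem_takeWhile_imp hx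
      have hsplit2 : rest.takeWhile PySem.Chars.isdigit ++ rest.dropWhile PySem.Chars.isdigit = rest :=
        List.takeWhile_append_dropWhile
      cases hd2 : rest.dropWhile PySem.Chars.isdigit with
      | nil =>
        have hreq : rest.takeWhile PySem.Chars.isdigit = rest := by
          rw [hd2] at hsplit2; simpa using hsplit2
        have hallr : ∀ x ∈ rest, PySem.Chars.isdigit x = true := hreq ▸ htw2
        have hone : decide (cs.count '.' ≤ 1) = true := by
          simp [hcnt, count_dot_zero _ hallr]
        simp [hreq, hone, any_of_all_digit _ hallr, all_digit_dot _ hallr]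
      | cons c2 rest2 =>
        have hc2nd : PySem.Chars.isdigit c2 = false := head_dropWhile_false rest rest2 _ c2 hd2
        have hc2mem : c2 ∈ rest := (List.dropWhile_sublist _).mem (by rw [hd2]; simp)
        by_cases hc2dot : c2 = '.'
        · subst hc2dot
          have h1 : 1 ≤ rest.count '.' := List.one_le_count_iff.mpr hc2mem
          have hcnt2 : decide (cs.count '.' ≤ 1) = false := by
            simp [hcnt]; omega
          simp [hcnt2]
        · have hnall : rest.all (fun c => PySem.Chars.isdigit c || c == '.') = false := by
            rw [List.all_eq_false]
            exact ⟨c2, hc2mem, by simp [hc2nd, hc2dot]⟩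
          simp [hnall]
    · have hnall : cs.all (fun c => PySem.Chars.isdigit c || c == '.') = false := by
        rw [List.all_eq_false]
        exact ⟨c, hcmem, by simp [hcnd, hcdot]⟩
      split
      · next rest2 heq =>
          exfalso; rw [List.cons.injEq] at heq; exact hcdot heq.1
      · simp [hnall]

-- per-token agreement of the classifications
theorem flag_eq (t : String) : (aIsAttrToken t || aIsBareNumber t) = altIsValueToken t := by
  unfold aIsAttrToken aIsBareNumber altIsValueToken
  by_cases h1 : PySem.Chars.startswith t.toList ['<'] = true
  · simp [h1]
  · by_cases h2 : PySem.Chars.isIn ['='] t.toList = true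
    · simp [h1, h2]
    · by_cases h3 : t = ""
      · subst h3; decide
      · simp [h1, h2, h3]
        cases hsl : PySem.Chars.strip t.toList with
        | nil => simp
        | cons c rest =>
          by_cases hsign : c = '+' ∨ c = '-'
          · simp only [if_pos hsign]
            rcases rest with _ | ⟨c2, rest2⟩
            · simp
            · simpa using scan_eq (c2 :: rest2)
          · simp only [if_neg hsign]
            simpa using scan_eq (c :: rest)

-- the separator A inserts between p and c, as a char list
def sepOf (p c : String) : List Char :=
  if altIsValueToken p && altIsValueToken c then [' '] else []

-- A's step produces the separator segment
theorem aStep_eq_seg (acc : List String) (p c : String) :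
    aStep acc p c = acc ++ (if altIsValueToken p && altIsValueToken c then [" ", c] else [c]) := by
  unfold aStep
  rw [← flag_eq p, ← flag_eq c]
  have hb : ((aIsAttrToken p && aIsAttrToken c) || (aIsBareNumber p && aIsBareNumber c) ||
       (aIsBareNumber p && aIsAttrToken c) || (aIsAttrToken p && aIsBareNumber c))
      = ((aIsAttrToken p || aIsBareNumber p) && (aIsAttrToken c || aIsBareNumber c)) := by
    cases aIsAttrToken p <;> cases aIsBareNumber p <;>
      cases aIsAttrToken c <;> cases aIsBareNumber c <;> rfl
  rw [hb]
  cases (aIsAttrToken p || aIsBareNumber p) && (aIsAttrToken c || aIsBareNumber c) <;> simp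

-- A's index loop over range(1, len) is the fold over adjacent pairs
theorem A_loop {α β : Type} (g : β → α → α → β) (d : α) (xs : List α) :
    ∀ (n k : Nat) (acc : β), 1 ≤ k → xs.length - k ≤ n →
    (PySem.List.pyRange (k : Int) (xs.length : Int) 1).foldl
        (fun acc i => g acc (PySem.List.pyGetD xs (i - 1) d) (PySem.List.pyGetD xs i d)) acc
      = pairFoldAux g acc (xs.drop (k - 1)) := by
  intro n
  induction n with
  | zero =>
    intro k acc hk hn
    have hlen : xs.length ≤ k := by omega
    rw [PySem.List.pyRange_one_eq_nil (by exact_mod_cast hlen)]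
    rw [pairFoldAux_short _ _ _ (by simp; omega)]
    rfl
  | succ n ih =>
    intro k acc hk hn
    by_cases hlt : k < xs.length
    · rw [PySem.List.pyRange_one_cons (by exact_mod_cast hlt)]
      rw [List.foldl_cons]
      have hkm : k - 1 < xs.length := by omega
      have e1 : PySem.List.pyGetD xs ((k : Int) - 1) d = xs[k - 1] := by
        rw [PySem.List.pyGetD_eq_getElem xs d (by omega) (by omega)]
        congr 1
        omega
      have e2 : PySem.List.pyGetD xs (k : Int) d = xs[k]'hlt := by
        rw [PySem.List.pyGetD_eq_getElem xs d (by omega) (by exact_mod_cast hlt)]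
        congr 1
      have hdrop1 : xs.drop (k - 1) = xs[k - 1] :: xs.drop k := by
        have h' := List.drop_eq_getElem_cons hkm
        rw [show k - 1 + 1 = k from by omega] at h'
        exact h'
      have hdrop2 : xs.drop k = xs[k]'hlt :: xs.drop (k + 1) :=
        List.drop_eq_getElem_cons hlt
      rw [e1, e2, hdrop1, hdrop2, pairFoldAux]
      rw [← hdrop2]
      have : ((k : Int) + 1) = ((k + 1 : Nat) : Int) := by push_cast; ring
      rw [this, ih (k + 1) _ (by omega) (by omega)]
      rfl
    · have hlen : xs.length ≤ k := by omega
      rw [PySem.List.pyRange_one_eq_nil (by exact_mod_cast hlen)]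
      rw [pairFoldAux_short _ _ _ (by simp; omega)]
      rfl

-- Chars.join with an empty separator is plain concatenation of the head
theorem join_nil_cons (p : List Char) (l : List (List Char)) :
    PySem.Chars.join [] (p :: l) = p ++ PySem.Chars.join [] l := by
  cases l with
  | nil => simp [PySem.Chars.join_singleton, PySem.Chars.join_nil]
  | cons q r => simp [PySem.Chars.join_cons_cons]

-- char-list value of one rendered run
def runChars (g : Bool × List String) : List Char :=
  PySem.Chars.join (if g.1 then [' '] else []) (g.2.map String.toList)

-- char-list value of B's whole output (use_space = false)
def bChars (tokens : List String) : List Char :=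
  PySem.Chars.join [] ((altGroups tokens).map runChars)

theorem bChars_eq_alt (tokens : List String) :
    (PySem.Str.join ""
      ((altGroups tokens).map (fun g =>
        if g.1 then PySem.Str.join " " g.2 else PySem.Str.join "" g.2)))
    = String.ofList (bChars tokens) := by
  unfold bChars runChars
  simp only [PySem.Str.join, List.map_map]
  congr 1
  congr 1
  apply List.map_congr_left
  intro g _
  cases hf : g.1 <;> simp [hf, PySem.Str.toList_join]

-- the key recurrence of the run-grouping output
theorem bChars_cons_cons (t0 c : String) (cs : List String) :
    bChars (t0 :: c :: cs) = t0.toList ++ sepOf t0 c ++ bChars (c :: cs) := by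
  unfold bChars sepOf
  by_cases hfc : altIsValueToken c = altIsValueToken t0
  · -- c continues t0's run
    have hgrp : altGroups (t0 :: c :: cs)
        = (altIsValueToken t0,
            t0 :: c :: cs.takeWhile (fun x => altIsValueToken x == altIsValueToken t0))
          :: altGroups (cs.dropWhile (fun x => altIsValueToken x == altIsValueToken t0)) := by
      rw [altGroups]
      simp [hfc]
    have hgrp2 : altGroups (c :: cs)
        = (altIsValueToken t0,
            c :: cs.takeWhile (fun x => altIsValueToken x == altIsValueToken t0))
          :: altGroups (cs.dropWhile (fun x => altIsValueToken x == altIsValueToken t0)) := by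
      rw [altGroups]
      simp [hfc]
    rw [hgrp, hgrp2]
    simp only [List.map_cons]
    rw [join_nil_cons, join_nil_cons]
    have hrun : runChars (altIsValueToken t0,
        t0 :: c :: cs.takeWhile (fun x => altIsValueToken x == altIsValueToken t0))
        = t0.toList ++ (if altIsValueToken t0 then [' '] else [])
          ++ runChars (altIsValueToken t0,
              c :: cs.takeWhile (fun x => altIsValueToken x == altIsValueToken t0)) := by
      unfold runChars
      simp [PySem.Chars.join_cons_cons]
    rw [hrun]
    have hsep : (if altIsValueToken t0 && altIsValueToken c then [' '] else [])
        = (if altIsValueToken t0 then [' '] else ([] : List Char)) := by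
      rw [hfc]; cases altIsValueToken t0 <;> simp
    rw [hsep]
    simp [List.append_assoc]
  · -- c starts a new run: t0's run is the singleton [t0]
    have hpc : (altIsValueToken c == altIsValueToken t0) = false := by
      simpa using hfc
    have hgrp : altGroups (t0 :: c :: cs) = (altIsValueToken t0, [t0]) :: altGroups (c :: cs) := by
      rw [altGroups]
      simp [hpc]
    rw [hgrp]
    simp only [List.map_cons]
    rw [join_nil_cons]
    have hrun : runChars (altIsValueToken t0, [t0]) = t0.toList := by
      unfold runChars; simp [PySem.Chars.join_singleton]
    have hsep : (if altIsValueToken t0 && altIsValueToken c then [' '] else ([] : List Char)) = [] := by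
      cases h0 : altIsValueToken t0 <;> cases h1 : altIsValueToken c <;>
        simp_all
    rw [hrun, hsep]
    simp

theorem bChars_singleton (t0 : String) : bChars [t0] = t0.toList := by
  unfold bChars
  rw [show altGroups [t0] = [(altIsValueToken t0, [t0])] from by rw [altGroups]; simp [altGroups]]
  simp [PySem.Chars.join_singleton]
  unfold runChars
  simp [PySem.Chars.join_singleton]

-- A's accumulated piece list (the segments aStep appends), as a string list
def pieces : String → List String → List String
  | _, [] => []
  | p, c :: t => (if altIsValueToken p && altIsValueToken c then [" ", c] else [c]) ++ pieces c t

theorem pairFold_eq_pieces (rest : List String) :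
    ∀ (t0 : String) (acc : List String),
    pairFoldAux aStep acc (t0 :: rest) = acc ++ pieces t0 rest := by
  induction rest with
  | nil => intro t0 acc; simp [pairFoldAux, pieces]
  | cons c cs ih =>
    intro t0 acc
    rw [pairFoldAux, ih c (aStep acc t0 c), aStep_eq_seg]
    rw [pieces]
    cases altIsValueToken t0 && altIsValueToken c <;> simp

-- the concatenation of A's pieces is B's grouped output
theorem pieces_eq_bChars (rest : List String) :
    ∀ (t0 : String),
    PySem.Chars.join [] ((t0 :: pieces t0 rest).map String.toList) = bChars (t0 :: rest) := by
  induction rest with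
  | nil =>
    intro t0
    simp [pieces, PySem.Chars.join_singleton, bChars_singleton]
  | cons c cs ih =>
    intro t0
    rw [bChars_cons_cons, ← ih c]
    rw [pieces]
    cases hf : altIsValueToken t0 && altIsValueToken c <;>
      simp [sepOf, hf, join_nil_cons, List.append_assoc]

-- ===== VERDICT (by name: the statement is the Claim_ definition above) =====
theorem tokens_to_string_spec : Claim_equal_tokens_to_string := by
  intro tokens use_space _hdom
  unfold Spec_tokens_to_string
  cases use_space with
  | true => rfl
  | false =>
    cases tokens with
    | nil =>
      unfold tokens_to_string_alt
      rw [altGroups]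
      rfl
    | cons t0 rest =>
      show PySem.Str.join ""
          ((PySem.List.pyRange 1 ((t0 :: rest).length : Int) 1).foldl
            (fun acc i => aStep acc (PySem.List.pyGetD (t0 :: rest) (i - 1) "")
              (PySem.List.pyGetD (t0 :: rest) i "")) [t0])
        = tokens_to_string_alt (t0 :: rest) false
      rw [show PySem.List.pyRange 1 ((t0 :: rest).length : Int) 1
            = PySem.List.pyRange ((1 : Nat) : Int) ((t0 :: rest).length : Int) 1 from rfl]
      rw [A_loop aStep "" (t0 :: rest) (t0 :: rest).length 1 [t0] (by omega) (by omega)]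
      show PySem.Str.join "" (pairFoldAux aStep [t0] (t0 :: rest))
        = tokens_to_string_alt (t0 :: rest) false
      rw [pairFold_eq_pieces rest t0 [t0]]
      rw [show tokens_to_string_alt (t0 :: rest) false = String.ofList (bChars (t0 :: rest)) from by
        rw [tokens_to_string_alt]; simpa using bChars_eq_alt (t0 :: rest)]
      rw [show ([t0] ++ pieces t0 rest) = t0 :: pieces t0 rest from rfl]
      rw [show PySem.Str.join "" (t0 :: pieces t0 rest)
            = String.ofList (PySem.Chars.join [] ((t0 :: pieces t0 rest).map String.toList)) from rfl]
      rw [pieces_eq_bChars rest t0]
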